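-- pv_equiv track=rewrite | github.com/knodemy/ai-agent | src/core/speech_generator.py | clean_script_metadata
-- ===== SOURCE A (Python) =====
-- def clean_script_metadata(script_text: str) -> str:
--     """Remove metadata lines from the beginning of the script and clean formatting."""
--     lines = script_text.split('\n')
--     cleaned_lines = []
--     skip_lines = True
--
--     for i, line in enumerate(lines):
--         line_stripped = line.strip()
--
--         # Skip metadata lines at the beginning (first 4-6 lines typically)
--         if skip_lines and i < 10:  # Check first 10 lines for metadata
--             # Skip lines that contain metadata patterns
--             if (line_stripped.startswith('Lecture Script:') or
--                 line_stripped.startswith('Generated for:') or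
--                 line_stripped.startswith('Source:') or
--                 line_stripped.startswith('Generated:') or
--                 line_stripped.startswith('---') or
--                 'Generated:' in line_stripped or
--                 'Source:' in line_stripped or
--                 line_stripped == ''):
--                 continue
--             else:
--                 skip_lines = False
--
--         # Only add non-metadata lines
--         if not skip_lines:
--             cleaned_lines.append(line)
--
--     return '\n'.join(cleaned_lines).strip()
-- ===== SOURCE B (Python) =====
-- def _is_meta(line: str) -> bool:
--     s = line.strip()
--     return (s.startswith('Lecture Script:') or
--             s.startswith('Generated for:') or
--             s.startswith('Source:') or
--             s.startswith('Generated:') or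
--             s.startswith('---') or
--             'Generated:' in s or
--             'Source:' in s or
--             s == '')
--
--
-- def clean_script_metadata(script_text: str) -> str:
--     """Remove metadata lines from the beginning of the script and clean formatting."""
--     rest = script_text
--     for _ in range(10):
--         head, sep, tail = rest.partition('\n')
--         if not _is_meta(head):
--             return rest.strip()
--         if not sep:          # the whole remaining text was one metadata line
--             return ''
--         rest = tail
--     return ''                # first 10 lines were all metadata
-- ===== Notes on version B (the rewrite author's own statement) =====
-- stated objective: alternative
-- what changed: B never builds a list of lines: it repeatedly partitions the raw string at its first newline (at most ten times), returning the stripped remainder at the first non-metadata head and an empty result when the text is exhausted or ten metadata lines were peeled, instead of A's split-into-lines loop with a skip flag and an accumulator.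
import Mathlib
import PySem

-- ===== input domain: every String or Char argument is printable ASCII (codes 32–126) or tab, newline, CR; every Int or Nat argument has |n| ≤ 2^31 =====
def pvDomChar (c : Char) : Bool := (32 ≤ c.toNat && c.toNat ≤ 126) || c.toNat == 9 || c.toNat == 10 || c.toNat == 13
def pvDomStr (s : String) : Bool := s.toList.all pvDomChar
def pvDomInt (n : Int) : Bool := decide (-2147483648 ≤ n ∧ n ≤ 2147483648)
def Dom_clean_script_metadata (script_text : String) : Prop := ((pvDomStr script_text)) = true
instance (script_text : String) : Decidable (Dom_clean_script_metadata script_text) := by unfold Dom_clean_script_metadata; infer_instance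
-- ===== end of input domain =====

-- B never builds a list of lines: it peels at most ten lines off the front of the raw
-- string by partitioning at the first newline, instead of A's split-into-lines loop
-- with a skip flag and an accumulator (objective: alternative; same cost).


-- ===== PORT A =====
-- A's 8-clause metadata OR-chain, in order, on the stripped line
def pvMetaA (ls : List Char) : Bool :=
  PySem.Chars.startswith ls "Lecture Script:".toList ||
  PySem.Chars.startswith ls "Generated for:".toList ||
  PySem.Chars.startswith ls "Source:".toList ||
  PySem.Chars.startswith ls "Generated:".toList ||
  PySem.Chars.startswith ls "---".toList ||
  PySem.Chars.isIn "Generated:".toList ls ||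
  PySem.Chars.isIn "Source:".toList ls ||
  ls == []

-- one iteration of A's for-loop: state = (cleaned_lines, skip_lines)
def pvStepA (st : List (List Char) × Bool) (p : Int × List Char) : List (List Char) × Bool :=
  let line := p.2
  let ls := PySem.Chars.strip line
  if st.2 && decide (p.1 < 10) then
    if pvMetaA ls then st                -- continue
    else (st.1 ++ [line], false)         -- skip_lines = False; line then appended below
  else if !st.2 then (st.1 ++ [line], st.2) else st

def clean_script_metadata (script_text : String) : String :=
  let lines := PySem.Chars.splitOn script_text.toList ['\n']
  let st := (PySem.List.enumerate lines).foldl pvStepA ([], true)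
  String.ofList (PySem.Chars.strip (PySem.Chars.join ['\n'] st.1))

-- ===== PORT B =====
-- B's _is_meta helper: the same OR-chain, taking the raw line and stripping inside
def pvIsMetaB (line : List Char) : Bool :=
  let s := PySem.Chars.strip line
  PySem.Chars.startswith s "Lecture Script:".toList ||
  PySem.Chars.startswith s "Generated for:".toList ||
  PySem.Chars.startswith s "Source:".toList ||
  PySem.Chars.startswith s "Generated:".toList ||
  PySem.Chars.startswith s "---".toList ||
  PySem.Chars.isIn "Generated:".toList s ||
  PySem.Chars.isIn "Source:".toList s ||
  s == []

-- B's for _ in range(10) loop over the remaining raw text; partition('\n') is exact as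
-- takeWhile/dropWhile (head = chars before the first '\n'; dropWhile = sep ++ tail)
def pvPeel : Nat → List Char → List Char
  | 0, _ => []                                           -- 10 metadata lines peeled
  | fuel + 1, rest =>
    let head := rest.takeWhile (fun c => c ≠ '\n')
    if !pvIsMetaB head then PySem.Chars.strip rest
    else
      match rest.dropWhile (fun c => c ≠ '\n') with
      | [] => []                                         -- no separator: last line was metadata
      | _ :: tail => pvPeel fuel tail

def clean_script_metadata_alt (script_text : String) : String :=
  String.ofList (pvPeel 10 script_text.toList)

-- ===== PRECONDITION & SPEC =====
def Spec_clean_script_metadata (script_text : String) (out : String) : Prop := out = clean_script_metadata_alt script_text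
instance (script_text : String) (out : String) : Decidable (Spec_clean_script_metadata script_text out) := by unfold Spec_clean_script_metadata; infer_instance

-- ===== CLAIM (what is proved, stated in full; the proofs are below) =====
def Claim_equal_clean_script_metadata : Prop := ∀ (script_text : String), Dom_clean_script_metadata script_text → Spec_clean_script_metadata script_text (clean_script_metadata script_text)

-- ===== LEMMAS AND PROOFS =====

-- structural single-char split, used to characterise PySem.Chars.splitOn · ['\n']
def pvSplit1 : List Char → List Char → List (List Char)
  | [], cur => [cur.reverse]
  | c :: rest, cur => if c = '\n' then cur.reverse :: pvSplit1 rest [] else pvSplit1 rest (c :: cur)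

theorem pv_go_eq : ∀ (fuel : Nat) (l cur : List Char) (acc : List (List Char)),
    l.length ≤ fuel →
    PySem.Chars.splitOn.go ['\n'] fuel l cur acc = acc.reverse ++ pvSplit1 l cur := by
  intro fuel
  induction fuel with
  | zero =>
    intro l cur acc h
    have : l = [] := List.length_eq_zero_iff.mp (Nat.le_zero.mp h)
    subst this
    simp [PySem.Chars.splitOn.go, pvSplit1]
  | succ n ih =>
    intro l cur acc h
    cases l with
    | nil => simp [PySem.Chars.splitOn.go, pvSplit1]
    | cons c rest =>
      by_cases hc : c = '\n'
      · subst hc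
        have hpre : List.isPrefixOf ['\n'] ('\n' :: rest) = true := by
          simp [List.isPrefixOf]
        simp only [PySem.Chars.splitOn.go, hpre, if_pos, List.length_cons, List.length_nil,
          Nat.zero_add, List.drop_succ_cons, List.drop_zero]
        rw [ih rest [] (cur.reverse :: acc) (by simpa using Nat.le_of_succ_le_succ h)]
        simp [pvSplit1]
      · have hpre : List.isPrefixOf ['\n'] (c :: rest) = false := by
          simp [List.isPrefixOf]
          exact fun hcn => (hc hcn.symm).elim
        simp only [PySem.Chars.splitOn.go, hpre, Bool.false_eq_true, if_neg, not_false_iff]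
        rw [ih rest (c :: cur) acc (by simpa using Nat.le_of_succ_le_succ h)]
        simp [pvSplit1, hc]

theorem pv_splitOn_eq (s : List Char) : PySem.Chars.splitOn s ['\n'] = pvSplit1 s [] := by
  show PySem.Chars.splitOn.go ['\n'] (s.length + 1) s [] [] = pvSplit1 s []
  rw [pv_go_eq (s.length + 1) s [] [] (Nat.le_succ _)]
  simp

theorem pv_split1_no_nl : ∀ (l cur : List Char), '\n' ∉ cur →
    ∀ p ∈ pvSplit1 l cur, '\n' ∉ p := by
  intro l
  induction l with
  | nil =>
    intro cur hcur p hp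
    simp [pvSplit1] at hp
    subst hp
    simpa using hcur
  | cons c rest ih =>
    intro cur hcur p hp
    by_cases hc : c = '\n'
    · subst hc
      simp [pvSplit1] at hp
      rcases hp with hp | hp
      · subst hp; simpa using hcur
      · exact ih [] (by simp) p hp
    · simp [pvSplit1, hc] at hp
      refine ih (c :: cur) ?_ p hp
      intro hmem
      rcases List.mem_cons.mp hmem with h | h
      · exact hc h.symm
      · exact hcur h

theorem pv_split1_ne_nil : ∀ (l cur : List Char), pvSplit1 l cur ≠ [] := by
  intro l
  induction l with
  | nil => intro cur; simp [pvSplit1]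
  | cons c rest ih =>
    intro cur
    by_cases hc : c = '\n'
    · subst hc; simp [pvSplit1]
    · simpa [pvSplit1, hc] using ih (c :: cur)

theorem pv_split1_join : ∀ (l cur : List Char),
    PySem.Chars.join ['\n'] (pvSplit1 l cur) = cur.reverse ++ l := by
  intro l
  induction l with
  | nil => intro cur; simp [pvSplit1, PySem.Chars.join, List.intercalate]
  | cons c rest ih =>
    intro cur
    by_cases hc : c = '\n'
    · subst hc
      rw [show pvSplit1 ('\n' :: rest) cur = cur.reverse :: pvSplit1 rest [] from by
        simp [pvSplit1]]
      cases hsp : pvSplit1 rest [] with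
      | nil => exact absurd hsp (pv_split1_ne_nil rest [])
      | cons y ys =>
        have := ih []
        rw [hsp] at this
        rw [PySem.Chars.join_cons_cons]
        simp at this ⊢
        simpa [List.append_assoc] using this
    · simp only [pvSplit1, if_neg hc]
      rw [ih (c :: cur)]
      simp

-- partition-by-'\n' of a piece with no '\n' glued to a tail
theorem pv_takeWhile_piece (x t : List Char) (hx : '\n' ∉ x) :
    (x ++ '\n' :: t).takeWhile (fun c => c ≠ '\n') = x ∧
    (x ++ '\n' :: t).dropWhile (fun c => c ≠ '\n') = '\n' :: t := by
  induction x with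
  | nil => simp
  | cons c cs ih =>
    have hc : c ≠ '\n' := fun h => hx (h ▸ List.mem_cons_self)
    have hcs : '\n' ∉ cs := fun h => hx (List.mem_cons_of_mem _ h)
    obtain ⟨h1, h2⟩ := ih hcs
    simp only [ne_eq, decide_not] at h1 h2
    constructor
    · rw [List.cons_append, List.takeWhile_cons]
      simp [hc, h1]
    · rw [List.cons_append, List.dropWhile_cons]
      simp [hc, h2]

theorem pv_takeWhile_all (x : List Char) (hx : '\n' ∉ x) :
    x.takeWhile (fun c => c ≠ '\n') = x ∧ x.dropWhile (fun c => c ≠ '\n') = [] := by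
  induction x with
  | nil => simp
  | cons c cs ih =>
    have hc : c ≠ '\n' := fun h => hx (h ▸ List.mem_cons_self)
    have hcs : '\n' ∉ cs := fun h => hx (List.mem_cons_of_mem _ h)
    obtain ⟨h1, h2⟩ := ih hcs
    simp only [ne_eq, decide_not] at h1 h2
    constructor
    · rw [List.takeWhile_cons]
      simp [hc, h1]
    · rw [List.dropWhile_cons]
      simp [hc, h2]

-- B's peel over the joined lines = boundary formulation over the line list
theorem pv_peel_eq : ∀ (fuel : Nat) (l : List (List Char)), (∀ x ∈ l, '\n' ∉ x) →
    pvPeel fuel (PySem.Chars.join ['\n'] l) =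
      (match (l.take fuel).findIdx? (fun line => !pvIsMetaB line) with
       | none => []
       | some j => PySem.Chars.strip (PySem.Chars.join ['\n'] (l.drop j))) := by
  intro fuel
  induction fuel with
  | zero => intro l _; simp [pvPeel]
  | succ n ih =>
    intro l hl
    cases l with
    | nil =>
      have hm : pvIsMetaB [] = true := by decide
      simp [pvPeel, PySem.Chars.join_nil, List.findIdx?_nil, hm]
    | cons x xs =>
      have hx : '\n' ∉ x := hl x List.mem_cons_self
      cases xs with
      | nil =>
        obtain ⟨h1, h2⟩ := pv_takeWhile_all x hx
        simp only [PySem.Chars.join_singleton, pvPeel, h1, h2]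
        by_cases hm : pvIsMetaB x
        · simp [hm, List.findIdx?_cons]
        · simp [hm, List.findIdx?_cons, PySem.Chars.join_singleton]
      | cons y ys =>
        have hjoin : PySem.Chars.join ['\n'] (x :: y :: ys) =
            x ++ '\n' :: PySem.Chars.join ['\n'] (y :: ys) := by
          rw [PySem.Chars.join_cons_cons]; simp
        obtain ⟨h1, h2⟩ := pv_takeWhile_piece x (PySem.Chars.join ['\n'] (y :: ys)) hx
        rw [hjoin]
        simp only [pvPeel, h1, h2]
        by_cases hm : pvIsMetaB x
        · simp only [hm, Bool.not_true, Bool.false_eq_true, if_neg, not_false_iff]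
          rw [ih (y :: ys) (fun z hz => hl z (List.mem_cons_of_mem _ hz))]
          rw [List.take_succ_cons, List.findIdx?_cons]
          simp only [hm, Bool.not_true, Bool.false_eq_true, if_neg, not_false_iff]
          cases hfi : ((y :: ys).take n).findIdx? (fun line => !pvIsMetaB line) with
          | none => simp
          | some j => simp [List.drop_succ_cons]
        · simp only [hm, Bool.not_false, if_pos]
          rw [List.take_succ_cons, List.findIdx?_cons]
          simp only [hm, Bool.not_false, if_pos]
          rw [List.drop_zero, hjoin]

-- once skip_lines is False, every remaining line is appended
theorem pv_foldl_false (l : List (List Char)) : ∀ (i : Int) (cleaned : List (List Char)),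
    (PySem.List.enumerate l i).foldl pvStepA (cleaned, false) = (cleaned ++ l, false) := by
  induction l with
  | nil => intro i cleaned; simp [PySem.List.enumerate_nil]
  | cons x xs ih =>
    intro i cleaned
    rw [PySem.List.enumerate_cons, List.foldl_cons]
    have hstep : pvStepA (cleaned, false) (i, x) = (cleaned ++ [x], false) := by
      simp [pvStepA]
    rw [hstep, ih (i + 1) (cleaned ++ [x])]
    simp

-- once the index reached 10 with skip_lines still True, nothing is ever appended
theorem pv_foldl_true_ge (l : List (List Char)) : ∀ (i : Int) (cleaned : List (List Char)), 10 ≤ i →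
    (PySem.List.enumerate l i).foldl pvStepA (cleaned, true) = (cleaned, true) := by
  induction l with
  | nil => intro i cleaned _; simp [PySem.List.enumerate_nil]
  | cons x xs ih =>
    intro i cleaned hi
    rw [PySem.List.enumerate_cons, List.foldl_cons]
    have hstep : pvStepA (cleaned, true) (i, x) = (cleaned, true) := by
      have h10 : ¬ (i < 10) := by omega
      simp [pvStepA, h10]
    rw [hstep]
    exact ih (i + 1) cleaned (by omega)

-- main invariant: A's loop from index i (skip still True) keeps the lines from the first
-- non-metadata index among the next (10 - i) lines on, or nothing if there is none
theorem pv_foldl_true (l : List (List Char)) : ∀ (i : Int) (cleaned : List (List Char)), 0 ≤ i →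
    ((PySem.List.enumerate l i).foldl pvStepA (cleaned, true)).1 =
      cleaned ++ (match (l.take (10 - i).toNat).findIdx? (fun line => !pvIsMetaB line) with
                  | none => []
                  | some j => l.drop j) := by
  induction l with
  | nil => intro i cleaned _; simp [PySem.List.enumerate_nil]
  | cons x xs ih =>
    intro i cleaned hi
    rw [PySem.List.enumerate_cons, List.foldl_cons]
    by_cases h10 : i < 10
    · have htake : ((10 - i).toNat) = ((10 - (i + 1)).toNat) + 1 := by omega
      rw [htake, List.take_succ_cons, List.findIdx?_cons]
      by_cases hm : pvMetaA (PySem.Chars.strip x)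
      · have hmB : (!pvIsMetaB x) = false := by
          show (!pvMetaA (PySem.Chars.strip x)) = false
          rw [hm]; rfl
        have hstep : pvStepA (cleaned, true) (i, x) = (cleaned, true) := by
          simp [pvStepA, h10, hm]
        rw [hmB, hstep, ih (i + 1) cleaned (by omega)]
        cases hfi : (xs.take (10 - (i + 1)).toNat).findIdx? (fun line => !pvIsMetaB line) with
        | none => simp
        | some j => simp [List.drop_succ_cons]
      · have hmB : (!pvIsMetaB x) = true := by
          show (!pvMetaA (PySem.Chars.strip x)) = true
          simp [Bool.eq_false_iff.mpr hm]
        have hstep : pvStepA (cleaned, true) (i, x) = (cleaned ++ [x], false) := by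
          simp [pvStepA, h10, hm]
        rw [hmB, hstep, pv_foldl_false]
        simp
    · have htake : ((10 - i).toNat) = 0 := by omega
      have hstep : pvStepA (cleaned, true) (i, x) = (cleaned, true) := by
        have : ¬ (i < 10) := h10
        simp [pvStepA, this]
      rw [hstep, pv_foldl_true_ge xs (i + 1) cleaned (by omega), htake]
      simp

-- ===== VERDICT (by name: the statement is the Claim_ definition above) =====
theorem clean_script_metadata_spec : Claim_equal_clean_script_metadata := by
  intro script_text _
  unfold Spec_clean_script_metadata clean_script_metadata clean_script_metadata_alt
  dsimp only
  have hsplit := pv_splitOn_eq script_text.toList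
  have hjoin : PySem.Chars.join ['\n'] (PySem.Chars.splitOn script_text.toList ['\n']) =
      script_text.toList := by
    rw [hsplit, pv_split1_join]; simp
  have hnn : ∀ x ∈ PySem.Chars.splitOn script_text.toList ['\n'], '\n' ∉ x := by
    rw [hsplit]; exact pv_split1_no_nl script_text.toList [] (by simp)
  have hA := pv_foldl_true (PySem.Chars.splitOn script_text.toList ['\n']) 0 [] (by omega)
  simp only [Int.sub_zero, List.nil_append, show ((10 : Int).toNat = 10) from rfl] at hA
  have hB := pv_peel_eq 10 (PySem.Chars.splitOn script_text.toList ['\n']) hnn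
  rw [hjoin] at hB
  rw [hA, hB]
  cases hfi : ((PySem.Chars.splitOn script_text.toList ['\n']).take 10).findIdx?
      (fun line => !pvIsMetaB line) with
  | none => rfl
  | some j => rfl
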